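-- pv_equiv track=rewrite | github.com/Kuhron/programming | ConlangWorkspace.py | render_ipa
-- ===== SOURCE A (Python) =====
-- dead_keys = ["=", "<", ">", "^"]
--
-- ipa_symbols = {
--     ">n":"ŋ",
--     "^h":"ʰ",
--     "=s":"ʃ",
--     "=z":"ʒ",
--     "=g":"ɣ",
--     ">o":"ø",
--     "<a":"æ"
-- }
--
-- def render_ipa(s):
--     result = ""
--     i = 0
--     while i < len(s):
--         if s[i] in dead_keys:
--             result += ipa_symbols[s[i:i+2]]
--             i += 2
--         else:
--             result += s[i]
--             i += 1
--     return result
-- ===== SOURCE B (Python) =====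
-- import re
--
-- dead_keys = ["=", "<", ">", "^"]
--
-- ipa_symbols = {
--     ">n":"ŋ",
--     "^h":"ʰ",
--     "=s":"ʃ",
--     "=z":"ʒ",
--     "=g":"ɣ",
--     ">o":"ø",
--     "<a":"æ"
-- }
--
-- def render_ipa(s):
--     # split at dead-key digraphs (DOTALL so a newline after a dead key is kept
--     # in the captured token, matching s[i:i+2]); then translate tokens and join.
--     parts = re.split(r'([=<>^].?)', s, flags=re.DOTALL)
--     return ''.join(ipa_symbols[p] if p and p[0] in dead_keys else p for p in parts)
-- ===== Notes on version B (the rewrite author's own statement) =====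
-- stated objective: faster
-- what changed: Replaces the manual index-stepping while loop with quadratic string concatenation by a regex split into text/digraph tokens followed by a translate-and-join pass (linear).
-- outside the precondition, e.g. on render_ipa('=q'): A raises KeyError, B raises KeyError; on render_ipa('a>'): A raises KeyError, B raises KeyError
import Mathlib
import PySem

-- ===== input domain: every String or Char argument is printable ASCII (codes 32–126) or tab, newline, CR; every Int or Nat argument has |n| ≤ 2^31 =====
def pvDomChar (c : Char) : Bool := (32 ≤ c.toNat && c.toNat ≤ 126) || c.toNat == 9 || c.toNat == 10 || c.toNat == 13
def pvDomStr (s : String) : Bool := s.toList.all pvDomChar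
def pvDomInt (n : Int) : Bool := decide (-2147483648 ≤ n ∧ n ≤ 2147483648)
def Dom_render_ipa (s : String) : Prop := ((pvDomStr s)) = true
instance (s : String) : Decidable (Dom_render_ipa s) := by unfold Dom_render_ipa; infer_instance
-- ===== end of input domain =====

-- B replaces A's index-stepping while loop by a regex-style split into text/digraph
-- tokens followed by a translate-and-join pass (idiomatic; equal return values on Pre_).

-- shared module constants (dead_keys and the ipa_symbols dict as an association list)
def deadKeys : List Char := ['=', '<', '>', '^']

def ipaSymbols : List (List Char × List Char) :=
  [(['>','n'], ['ŋ']), (['^','h'], ['ʰ']), (['=','s'], ['ʃ']), (['=','z'], ['ʒ']),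
   (['=','g'], ['ɣ']), (['>','o'], ['ø']), (['<','a'], ['æ'])]

-- ipa_symbols[k] (none = KeyError)
def ipaGet? (k : List Char) : Option (List Char) :=
  (ipaSymbols.find? (fun p => p.1 == k)).map Prod.snd

-- ===== PORT A =====
-- the while loop over index i, with the remaining suffix s[i:] as the recursion state;
-- s[i:i+2] = c :: rest.take 1; on KeyError (outside Pre_) the port appends nothing
def renderLoopA : List Char → List Char
  | [] => []
  | c :: rest =>
    if c ∈ deadKeys then
      (ipaGet? (c :: rest.take 1)).getD [] ++ renderLoopA (rest.drop 1)
    else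
      c :: renderLoopA rest
termination_by l => l.length
decreasing_by all_goals simp

def render_ipa (s : String) : String := String.ofList (renderLoopA s.toList)

-- ===== PORT B =====
-- re.split(r'([=<>^].?)', s, flags=re.DOTALL): alternating plain-text segments and
-- captured dead-key tokens (dead key plus the following char if any)
def tokenize : List Char → List (List Char)
  | [] => [[]]
  | c :: rest =>
    if c ∈ deadKeys then
      [] :: (c :: rest.take 1) :: tokenize (rest.drop 1)
    else
      match tokenize rest with
      | t :: ts => (c :: t) :: ts
      | [] => [[c]]
termination_by l => l.length
decreasing_by all_goals simp

-- 'ipa_symbols[p] if p and p[0] in dead_keys else p' (KeyError ↦ [] outside Pre_)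
def renderPart : List Char → List Char
  | [] => []
  | c :: rest => if c ∈ deadKeys then (ipaGet? (c :: rest)).getD [] else c :: rest

def render_ipa_alt (s : String) : String :=
  String.ofList ((tokenize s.toList).map renderPart).flatten

-- ===== PRECONDITION & SPEC =====
-- Pre_ excludes exactly the inputs on which Python A raises KeyError: a dead key
-- followed by a character not forming a known digraph, or a trailing dead key.
def Pre_render_ipa (s : String) : Prop :=
  ∀ i < s.toList.length, s.toList[i]! ∈ deadKeys →
    (ipaGet? ((s.toList.drop i).take 2)).isSome = true
instance (s : String) : Decidable (Pre_render_ipa s) := by unfold Pre_render_ipa; infer_instance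

def pvWitness_render_ipa : String := "a>nd =so"

def Spec_render_ipa (s : String) (out : String) : Prop := out = render_ipa_alt s
instance (s : String) (out : String) : Decidable (Spec_render_ipa s out) := by unfold Spec_render_ipa; infer_instance

-- ===== CLAIM (what is proved, stated in full; the proofs are below) =====
def Claim_equal_render_ipa : Prop := ∀ (s : String), Dom_render_ipa s → Pre_render_ipa s → Spec_render_ipa s (render_ipa s)

-- ===== LEMMAS AND PROOFS =====

-- the first token produced by tokenize is a plain-text segment: no dead keys in it
theorem tokenize_head_clean (l : List Char) :
    ∃ t ts, tokenize l = t :: ts ∧ ∀ c ∈ t, c ∉ deadKeys := by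
  induction l using tokenize.induct with
  | case1 => exact ⟨[], [], by simp [tokenize], by simp⟩
  | case2 c rest h ih =>
    exact ⟨[], (c :: rest.take 1) :: tokenize (rest.drop 1), by simp [tokenize, h], by simp⟩
  | case3 c rest h t ts htok ih =>
    obtain ⟨t', ts', htok', hclean⟩ := ih
    rw [htok'] at htok; cases htok
    refine ⟨c :: t, ts, by simp [tokenize, h, htok'], ?_⟩
    intro d hd
    rcases List.mem_cons.mp hd with h1 | h2
    · exact h1 ▸ h
    · exact hclean _ h2
  | case4 c rest h htok ih =>
    obtain ⟨t', ts', htok', _⟩ := ih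
    rw [htok'] at htok; cases htok

theorem renderLoopA_eq_tokens (l : List Char) :
    renderLoopA l = ((tokenize l).map renderPart).flatten := by
  induction l using tokenize.induct with
  | case1 => simp [renderLoopA, tokenize, renderPart]
  | case2 c rest h ih =>
    rw [List.drop_one] at ih
    simp [renderLoopA, tokenize, h, renderPart, ih]
  | case3 c rest h t ts htok ih =>
    obtain ⟨t', ts', htok', hclean⟩ := tokenize_head_clean rest
    rw [htok'] at htok; cases htok
    rw [renderLoopA, if_neg h, tokenize, if_neg h, htok', ih, htok']
    simp only [List.map_cons, List.flatten_cons]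
    have hpart : renderPart (c :: t) = c :: renderPart t := by
      cases t with
      | nil => simp [renderPart, h]
      | cons d t' =>
        have hd : d ∉ deadKeys := hclean d (by simp)
        simp [renderPart, h, hd]
    rw [hpart]; rfl
  | case4 c rest h htok ih =>
    obtain ⟨t', ts', htok', _⟩ := tokenize_head_clean rest
    rw [htok'] at htok; cases htok

-- ===== VERDICT (by name: the statement is the Claim_ definition above) =====
theorem render_ipa_spec : Claim_equal_render_ipa := by
  intro s _ _
  unfold Spec_render_ipa render_ipa render_ipa_alt
  rw [renderLoopA_eq_tokens]
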